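-- pv_equiv track=rewrite | github.com/Morisset/PyNeb_devel | pyneb/utils/misc.py | parseAtom2
-- ===== SOURCE A (Python) =====
-- def parseAtom2(atom):
--     '''
--     Parses an atom label into the element and spectrum parts
--     '''
--
--     iso = ''
--     elem = ''
--     spec = ''
--     cont = True
--     firstdigit = True
--     for l in atom:
--         if l.isalpha() and cont:
--             elem += l
--             firstdigit = False
--         elif l.isdigit():
--             if firstdigit:
--                 iso += l
--             else:
--                 spec += l
--                 cont = False
--     if atom[-1] == 'r':
--         rec = 'r'
--     else:
--         rec = ''
--     return iso+str.capitalize(elem), spec, rec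
-- ===== SOURCE B (Python) =====
-- def _split_at_first(s, pred):
--     # split s before the first character satisfying pred (all of s if none)
--     for i, c in enumerate(s):
--         if pred(c):
--             return s[:i], s[i:]
--     return s, ''
--
-- def parseAtom2(atom):
--     '''
--     Parses an atom label into the element and spectrum parts
--     '''
--     rec = 'r' if atom[-1] == 'r' else ''
--     pre, rest = _split_at_first(atom, str.isalpha)
--     mid, tail = _split_at_first(rest, str.isdigit)
--     iso = ''.join(c for c in pre if c.isdigit())
--     elem = ''.join(c for c in mid if c.isalpha())
--     spec = ''.join(c for c in tail if c.isdigit())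
--     return iso + elem.capitalize(), spec, rec
-- ===== Notes on version B (the rewrite author's own statement) =====
-- stated objective: alternative
-- what changed: A's single flag-driven scan (cont/firstdigit state machine) is replaced by a boundary decomposition: split the string before the first alphabetic character and then before the first digit after it, and filter each of the three slices by character class.
import Mathlib
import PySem

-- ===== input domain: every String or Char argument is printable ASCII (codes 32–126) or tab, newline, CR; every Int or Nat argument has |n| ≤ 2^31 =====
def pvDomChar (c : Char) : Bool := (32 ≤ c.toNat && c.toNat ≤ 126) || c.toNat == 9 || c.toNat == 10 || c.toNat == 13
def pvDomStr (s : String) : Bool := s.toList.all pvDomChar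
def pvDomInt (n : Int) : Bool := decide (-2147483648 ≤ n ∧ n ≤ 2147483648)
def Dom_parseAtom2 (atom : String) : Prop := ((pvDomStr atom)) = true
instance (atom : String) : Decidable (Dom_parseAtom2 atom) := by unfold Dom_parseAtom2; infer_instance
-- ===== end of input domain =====

-- B replaces A's flag-driven single scan by a boundary decomposition (split at first
-- alpha, then first digit, then filter each slice by character class); alternative, same cost.


-- ===== PORT A =====
-- str.capitalize, hand-ported: first char uppercased, the rest lowercased (exact on ASCII)
def pvCap (cs : List Char) : List Char :=
  match cs with
  | [] => []
  | c :: rest => PySem.Chars.upperChar c :: rest.map PySem.Chars.lowerChar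

-- A's for-loop over the characters, state (iso, elem, spec, cont, firstdigit)
def loopA : List Char → List Char → List Char → List Char → Bool → Bool → List Char × List Char × List Char
  | [], iso, elem, spec, _, _ => (iso, elem, spec)
  | l :: ls, iso, elem, spec, cont, firstdigit =>
    if PySem.Chars.isalpha l && cont then loopA ls iso (elem ++ [l]) spec cont false
    else if PySem.Chars.isdigit l then
      if firstdigit then loopA ls (iso ++ [l]) elem spec cont firstdigit
      else loopA ls iso elem (spec ++ [l]) false firstdigit
    else loopA ls iso elem spec cont firstdigit

def parseAtom2 (atom : String) : String × String × String :=
  let r := loopA atom.toList [] [] [] true true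
  let recv := match PySem.Str.pyGet? atom (-1) with      -- atom[-1]: none = IndexError, excluded by Pre_
    | some 'r' => "r"
    | _ => ""
  (String.ofList (r.1 ++ pvCap r.2.1), String.ofList r.2.2, recv)

-- ===== PORT B =====
-- _split_at_first: split before the first character satisfying pred
def splitAtFirst (pred : Char → Bool) : List Char → List Char × List Char
  | [] => ([], [])
  | c :: cs =>
    if pred c then ([], c :: cs)
    else
      let p := splitAtFirst pred cs
      (c :: p.1, p.2)

-- str.capitalize for B (exact on ASCII, as for A's pvCap)
def pvCapB (cs : List Char) : List Char :=
  match cs with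
  | [] => []
  | c :: rest => PySem.Chars.upperChar c :: rest.map PySem.Chars.lowerChar

def parseAtom2_alt (atom : String) : String × String × String :=
  -- atom[-1]: none = IndexError, excluded by Pre_
  let recv := if PySem.Str.pyGet? atom (-1) = some 'r' then "r" else ""
  let s1 := splitAtFirst PySem.Chars.isalpha atom.toList
  let s2 := splitAtFirst PySem.Chars.isdigit s1.2
  let iso := s1.1.filter PySem.Chars.isdigit
  let elem := s2.1.filter PySem.Chars.isalpha
  let spec := s2.2.filter PySem.Chars.isdigit
  (String.ofList (iso ++ pvCapB elem), String.ofList spec, recv)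

-- ===== PRECONDITION & SPEC =====
-- Pre_ excludes only the empty string, on which both Pythons raise IndexError (atom[-1]).
def Pre_parseAtom2 (atom : String) : Prop := atom ≠ ""
instance (atom : String) : Decidable (Pre_parseAtom2 atom) := by unfold Pre_parseAtom2; infer_instance
def pvWitness_parseAtom2 : String := "12Cr3"

def Spec_parseAtom2 (atom : String) (out : String × String × String) : Prop := out = parseAtom2_alt atom
instance (atom : String) (out : String × String × String) : Decidable (Spec_parseAtom2 atom out) := by unfold Spec_parseAtom2; infer_instance

-- ===== CLAIM (what is proved, stated in full; the proofs are below) =====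
def Claim_equal_parseAtom2 : Prop := ∀ (atom : String), Dom_parseAtom2 atom → Pre_parseAtom2 atom → Spec_parseAtom2 atom (parseAtom2 atom)

-- ===== LEMMAS AND PROOFS =====

theorem alpha_not_digit {c : Char} (h : PySem.Chars.isalpha c = true) :
    PySem.Chars.isdigit c = false := by
  simp [PySem.Chars.isalpha, PySem.Chars.isupper, PySem.Chars.islower,
        PySem.Chars.isdigit, Char.le_def, UInt32.le_iff_toNat_le] at h ⊢
  rcases h with h | h <;> omega

theorem digit_not_alpha {c : Char} (h : PySem.Chars.isdigit c = true) :
    PySem.Chars.isalpha c = false := by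
  simp [PySem.Chars.isalpha, PySem.Chars.isupper, PySem.Chars.islower,
        PySem.Chars.isdigit, Char.le_def, UInt32.le_iff_toNat_le] at h ⊢
  omega

-- phase 3: cont = false, firstdigit = false — only digits are appended to spec
theorem loopA_phase3 (cs iso elem spec) :
    loopA cs iso elem spec false false = (iso, elem, spec ++ cs.filter PySem.Chars.isdigit) := by
  induction cs generalizing spec with
  | nil => simp [loopA]
  | cons c cs ih =>
    by_cases hd : PySem.Chars.isdigit c = true
    · simp [loopA, hd, ih]
    · simp at hd
      simp [loopA, hd, ih]

-- phase 2: cont = true, firstdigit = false — alphas grow elem until the first digit, then phase 3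
theorem loopA_phase2 (cs iso elem spec) :
    loopA cs iso elem spec true false =
      (iso, elem ++ (splitAtFirst PySem.Chars.isdigit cs).1.filter PySem.Chars.isalpha,
            spec ++ (splitAtFirst PySem.Chars.isdigit cs).2.filter PySem.Chars.isdigit) := by
  induction cs generalizing elem with
  | nil => simp [splitAtFirst, loopA]
  | cons c cs ih =>
    by_cases hd : PySem.Chars.isdigit c = true
    · simp [loopA, splitAtFirst, hd, digit_not_alpha hd, loopA_phase3]
    · simp at hd
      by_cases ha : PySem.Chars.isalpha c = true
      · simp [loopA, splitAtFirst, hd, ha, ih]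
      · simp at ha
        simp [loopA, splitAtFirst, hd, ha, ih]

-- phase 1: cont = true, firstdigit = true — digits grow iso until the first alpha, then phase 2
theorem loopA_phase1 (cs iso elem spec) :
    loopA cs iso elem spec true true =
      (iso ++ ((splitAtFirst PySem.Chars.isalpha cs).1.filter PySem.Chars.isdigit),
       elem ++ ((splitAtFirst PySem.Chars.isdigit (splitAtFirst PySem.Chars.isalpha cs).2).1.filter PySem.Chars.isalpha),
       spec ++ ((splitAtFirst PySem.Chars.isdigit (splitAtFirst PySem.Chars.isalpha cs).2).2.filter PySem.Chars.isdigit)) := by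
  induction cs generalizing iso with
  | nil => simp [splitAtFirst, loopA]
  | cons c cs ih =>
    by_cases ha : PySem.Chars.isalpha c = true
    · simp [loopA, splitAtFirst, ha, alpha_not_digit ha, loopA_phase2]
    · simp at ha
      by_cases hd : PySem.Chars.isdigit c = true
      · simp [loopA, splitAtFirst, ha, hd, ih]
      · simp at hd
        simp [loopA, splitAtFirst, ha, hd, ih]

theorem pvCap_eq_pvCapB (cs : List Char) : pvCap cs = pvCapB cs := by
  cases cs <;> rfl

theorem match_r_eq_if (o : Option Char) :
    (match o with | some 'r' => "r" | _ => ("" : String)) = if o = some 'r' then "r" else "" := by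
  rcases o with _ | c
  · rfl
  · by_cases h : c = 'r' <;> simp [h]

-- ===== VERDICT (by name: the statement is the Claim_ definition above) =====
theorem parseAtom2_spec : Claim_equal_parseAtom2 := by
  intro atom _ _
  unfold Spec_parseAtom2 parseAtom2 parseAtom2_alt
  simp [loopA_phase1, pvCap_eq_pvCapB, match_r_eq_if]
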